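-- pv_equiv track=rewrite | github.com/shuhan-wang1/continual-dreamerv3-autocurricula | train_craftax.py | _compute_achievement_depth
-- ===== SOURCE A (Python) =====
-- CRAFTAX_ACHIEVEMENT_NAMES = [
--     'collect_wood', 'place_table', 'eat_cow', 'collect_sapling',
--     'collect_drink', 'make_wood_pickaxe', 'make_wood_sword',
--     'place_stone', 'collect_stone', 'place_furnace', 'collect_coal',
--     'collect_iron', 'make_stone_pickaxe', 'make_stone_sword',
--     'make_iron_pickaxe', 'make_iron_sword', 'collect_diamond',
--     'make_diamond_pickaxe', 'make_diamond_sword',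
--     'defeat_zombie', 'defeat_skeleton', 'wake_up_boss',
-- ]
--
-- ACHIEVEMENT_TIERS = {
--     'collect_wood': 0, 'place_table': 0, 'eat_cow': 0, 'collect_sapling': 0,
--     'collect_drink': 0, 'make_wood_pickaxe': 0, 'make_wood_sword': 0,
--     'place_stone': 1, 'collect_stone': 1, 'place_furnace': 1, 'collect_coal': 1,
--     'collect_iron': 1, 'make_stone_pickaxe': 1, 'make_stone_sword': 1,
--     'make_iron_pickaxe': 2, 'make_iron_sword': 2, 'collect_diamond': 2,
--     'make_diamond_pickaxe': 3, 'make_diamond_sword': 3,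
--     'defeat_zombie': 4, 'defeat_skeleton': 4, 'wake_up_boss': 4,
-- }
--
-- def _compute_achievement_depth(achievements):
--     """Compute max achievement tier from achievement vector."""
--     max_tier = -1
--     for i, achieved in enumerate(achievements):
--         if achieved and i < len(CRAFTAX_ACHIEVEMENT_NAMES):
--             name = CRAFTAX_ACHIEVEMENT_NAMES[i]
--             if name in ACHIEVEMENT_TIERS:
--                 max_tier = max(max_tier, ACHIEVEMENT_TIERS[name])
--     return max_tier
-- ===== SOURCE B (Python) =====
-- CRAFTAX_ACHIEVEMENT_NAMES = [
--     'collect_wood', 'place_table', 'eat_cow', 'collect_sapling',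
--     'collect_drink', 'make_wood_pickaxe', 'make_wood_sword',
--     'place_stone', 'collect_stone', 'place_furnace', 'collect_coal',
--     'collect_iron', 'make_stone_pickaxe', 'make_stone_sword',
--     'make_iron_pickaxe', 'make_iron_sword', 'collect_diamond',
--     'make_diamond_pickaxe', 'make_diamond_sword',
--     'defeat_zombie', 'defeat_skeleton', 'wake_up_boss',
-- ]
--
-- ACHIEVEMENT_TIERS = {
--     'collect_wood': 0, 'place_table': 0, 'eat_cow': 0, 'collect_sapling': 0,
--     'collect_drink': 0, 'make_wood_pickaxe': 0, 'make_wood_sword': 0,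
--     'place_stone': 1, 'collect_stone': 1, 'place_furnace': 1, 'collect_coal': 1,
--     'collect_iron': 1, 'make_stone_pickaxe': 1, 'make_stone_sword': 1,
--     'make_iron_pickaxe': 2, 'make_iron_sword': 2, 'collect_diamond': 2,
--     'make_diamond_pickaxe': 3, 'make_diamond_sword': 3,
--     'defeat_zombie': 4, 'defeat_skeleton': 4, 'wake_up_boss': 4,
-- }
--
-- # Precomputed once at import: tier number -> list of achievement indices in that tier.
-- _TIER_TO_INDICES = {t: [] for t in range(5)}
-- for _i, _name in enumerate(CRAFTAX_ACHIEVEMENT_NAMES):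
--     _t = ACHIEVEMENT_TIERS.get(_name)
--     if _t is not None:
--         _TIER_TO_INDICES[_t].append(_i)
--
--
-- def _compute_achievement_depth(achievements):
--     """Compute max achievement tier from achievement vector."""
--     n = len(achievements)
--     for tier in (4, 3, 2, 1, 0):
--         if any(i < n and achievements[i] for i in _TIER_TO_INDICES[tier]):
--             return tier
--     return -1
-- ===== Notes on version B (the rewrite author's own statement) =====
-- stated objective: alternative
-- what changed: Replaces A's single max-tracking pass over the achievement vector (with per-index name lookup and dict lookup) by a precomputed tier->indices table scanned from the highest tier down with an early return on the first tier that has an achieved index.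
import Mathlib
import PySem

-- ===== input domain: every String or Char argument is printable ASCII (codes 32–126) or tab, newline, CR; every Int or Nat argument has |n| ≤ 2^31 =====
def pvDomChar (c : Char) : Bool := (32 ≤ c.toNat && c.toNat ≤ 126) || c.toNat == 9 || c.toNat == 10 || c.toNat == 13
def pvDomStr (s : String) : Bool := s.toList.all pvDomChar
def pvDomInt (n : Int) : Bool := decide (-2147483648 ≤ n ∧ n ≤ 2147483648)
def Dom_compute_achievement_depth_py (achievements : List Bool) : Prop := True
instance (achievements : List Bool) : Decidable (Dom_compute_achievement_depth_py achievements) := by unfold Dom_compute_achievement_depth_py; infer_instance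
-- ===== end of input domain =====

-- B replaces A's max-tracking pass by a precomputed tier→indices table scanned from the
-- highest tier down with an early exit (objective: alternative decomposition, same cost).

-- ===== PORT A =====
def pvNames : List String :=
  ["collect_wood", "place_table", "eat_cow", "collect_sapling",
   "collect_drink", "make_wood_pickaxe", "make_wood_sword",
   "place_stone", "collect_stone", "place_furnace", "collect_coal",
   "collect_iron", "make_stone_pickaxe", "make_stone_sword",
   "make_iron_pickaxe", "make_iron_sword", "collect_diamond",
   "make_diamond_pickaxe", "make_diamond_sword",
   "defeat_zombie", "defeat_skeleton", "wake_up_boss"]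

def pvTiers : PySem.Dict String Int :=
  PySem.Dict.ofList
    [("collect_wood", 0), ("place_table", 0), ("eat_cow", 0), ("collect_sapling", 0),
     ("collect_drink", 0), ("make_wood_pickaxe", 0), ("make_wood_sword", 0),
     ("place_stone", 1), ("collect_stone", 1), ("place_furnace", 1), ("collect_coal", 1),
     ("collect_iron", 1), ("make_stone_pickaxe", 1), ("make_stone_sword", 1),
     ("make_iron_pickaxe", 2), ("make_iron_sword", 2), ("collect_diamond", 2),
     ("make_diamond_pickaxe", 3), ("make_diamond_sword", 3),
     ("defeat_zombie", 4), ("defeat_skeleton", 4), ("wake_up_boss", 4)]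

-- the loop body of A: `if achieved and i < len(NAMES): name = NAMES[i]; if name in TIERS: max_tier = max(max_tier, TIERS[name])`
def pvStepA (max_tier : Int) (p : Int × Bool) : Int :=
  if p.2 && decide (p.1 < (pvNames.length : Int)) then
    match PySem.List.pyGet? pvNames p.1 with   -- in range by the guard, so never `none`
    | some name =>
      match PySem.Dict.get? pvTiers name with  -- `name in TIERS` + `TIERS[name]`
      | some t => max max_tier t
      | none => max_tier
    | none => max_tier
  else max_tier

def compute_achievement_depth_py (achievements : List Bool) : Int :=
  (PySem.List.enumerate achievements).foldl pvStepA (-1)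

-- ===== PORT B =====
-- the precomputed tier → indices table of Source B, highest tier first
def pvTierTable : List (Int × List Nat) :=
  [(4, [19, 20, 21]), (3, [17, 18]), (2, [14, 15, 16]),
   (1, [7, 8, 9, 10, 11, 12, 13]), (0, [0, 1, 2, 3, 4, 5, 6])]

-- `any(i < n and achievements[i] for i in idxs)`
def pvHit (achs : List Bool) (idxs : List Nat) : Bool :=
  idxs.any (fun i => decide (i < achs.length) && achs.getD i false)

-- the descending loop with early return
def pvAltGo (achs : List Bool) : List (Int × List Nat) → Int
  | [] => -1
  | (t, idxs) :: rest => if pvHit achs idxs then t else pvAltGo achs rest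

def compute_achievement_depth_py_alt (achievements : List Bool) : Int :=
  pvAltGo achievements pvTierTable

-- ===== PRECONDITION & SPEC =====
def Spec_compute_achievement_depth_py (achievements : List Bool) (out : Int) : Prop := out = compute_achievement_depth_py_alt achievements
instance (achievements : List Bool) (out : Int) : Decidable (Spec_compute_achievement_depth_py achievements out) := by unfold Spec_compute_achievement_depth_py; infer_instance

-- ===== CLAIM (what is proved, stated in full; the proofs are below) =====
def Claim_equal_compute_achievement_depth_py : Prop := ∀ (achievements : List Bool), Dom_compute_achievement_depth_py achievements → Spec_compute_achievement_depth_py achievements (compute_achievement_depth_py achievements)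

-- ===== LEMMAS AND PROOFS =====

theorem pvA_append (xs : List Bool) (b : Bool) :
    compute_achievement_depth_py (xs ++ [b]) =
      pvStepA (compute_achievement_depth_py xs) ((xs.length : Int), b) := by
  unfold compute_achievement_depth_py
  rw [PySem.List.enumerate_append]
  simp [PySem.List.enumerate_cons, PySem.List.enumerate_nil]

theorem pvPt (xs : List Bool) (b : Bool) (i : Nat) :
    (decide (i < (xs ++ [b]).length) && (xs ++ [b]).getD i false) =
      ((decide (i < xs.length) && xs.getD i false) || (b && decide (i = xs.length))) := by
  rcases Nat.lt_trichotomy i xs.length with h | h | h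
  · simp [List.getD, h, Nat.le_of_lt h, Nat.ne_of_lt h]
  · subst h
    simp [List.getD]
  · have h1 : ¬ i < (xs ++ [b]).length := by simp; omega
    simp only [h1, Nat.lt_asymm h]
    have : ¬ (i = xs.length) := Nat.ne_of_gt h
    simp [this, Nat.lt_asymm h]

theorem pvHit_append (xs : List Bool) (b : Bool) (idxs : List Nat) :
    pvHit (xs ++ [b]) idxs = (pvHit xs idxs || (b && decide (xs.length ∈ idxs))) := by
  induction idxs with
  | nil => simp [pvHit]
  | cons i rest ih =>
    simp only [pvHit, List.any_cons] at ih ⊢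
    rw [pvPt, ih]
    by_cases hm : i = xs.length
    · subst hm; cases b <;> simp
    · have : ¬ xs.length = i := fun h => hm h.symm
      simp [hm, this, Bool.or_assoc]

theorem pvMain (xs : List Bool) :
    compute_achievement_depth_py xs = compute_achievement_depth_py_alt xs := by
  induction xs using List.reverseRecOn with
  | nil => decide
  | append_singleton xs b ih =>
    rw [pvA_append, ih]
    unfold compute_achievement_depth_py_alt
    simp only [pvAltGo, pvTierTable, pvHit_append]
    cases b with
    | false => simp [pvStepA]
    | true =>
      by_cases h : xs.length < 22
      · interval_cases h22 : xs.length <;>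
          · generalize pvHit xs [19, 20, 21] = h4
            generalize pvHit xs [17, 18] = h3
            generalize pvHit xs [14, 15, 16] = h2
            generalize pvHit xs [7, 8, 9, 10, 11, 12, 13] = h1
            generalize pvHit xs [0, 1, 2, 3, 4, 5, 6] = h0
            cases h4 <;> cases h3 <;> cases h2 <;> cases h1 <;> cases h0 <;> decide
      · have hg : ¬ ((xs.length : Int) < (pvNames.length : Int)) := by
          show ¬ ((xs.length : Int) < ((22 : Nat) : Int))
          exact_mod_cast h
        have m4 : ¬ xs.length ∈ [19, 20, 21] := fun hmem =>
          h ((by decide : ∀ x ∈ [19, 20, 21], x < 22) _ hmem)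
        have m3 : ¬ xs.length ∈ [17, 18] := fun hmem =>
          h ((by decide : ∀ x ∈ [17, 18], x < 22) _ hmem)
        have m2 : ¬ xs.length ∈ [14, 15, 16] := fun hmem =>
          h ((by decide : ∀ x ∈ [14, 15, 16], x < 22) _ hmem)
        have m1 : ¬ xs.length ∈ [7, 8, 9, 10, 11, 12, 13] := fun hmem =>
          h ((by decide : ∀ x ∈ [7, 8, 9, 10, 11, 12, 13], x < 22) _ hmem)
        have m0 : ¬ xs.length ∈ [0, 1, 2, 3, 4, 5, 6] := fun hmem =>
          h ((by decide : ∀ x ∈ [0, 1, 2, 3, 4, 5, 6], x < 22) _ hmem)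
        simp [pvStepA, hg, m4, m3, m2, m1, m0]

-- ===== VERDICT (by name: the statement is the Claim_ definition above) =====
theorem compute_achievement_depth_py_spec : Claim_equal_compute_achievement_depth_py := by
  intro achievements _
  exact pvMain achievements
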